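-- pv_equiv track=rewrite | github.com/debods/Digital-Hub-for-ham-radio | DigiHub/pyscripts/aprspass.py | aprs_passcode
-- ===== SOURCE A (Python) =====
-- def aprs_passcode(callsign: str) -> int:
--     callsign = callsign.upper().split('-')[0]  # Remove SSID if present
--     hash = 0x73E2
--
--     for i, char in enumerate(callsign):
--         if i % 2 == 0:
--             hash ^= ord(char) << 8
--         else:
--             hash ^= ord(char)
--     return hash & 0x7FFF  # 15-bit mask
-- ===== SOURCE B (Python) =====
-- def aprs_passcode(callsign: str) -> int:
--     base = callsign.upper().split('-')[0]  # Remove SSID if present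
--     hi = 0
--     for c in base[::2]:
--         hi ^= ord(c)
--     lo = 0
--     for c in base[1::2]:
--         lo ^= ord(c)
--     return (0x73E2 ^ (hi << 8) ^ lo) & 0x7FFF
-- ===== Notes on version B (the rewrite author's own statement) =====
-- stated objective: faster
-- what changed: Instead of one pass over the indexed string with an i % 2 parity branch updating a single 16-bit hash, B makes two staged passes over the even-index and odd-index slices (base[::2], base[1::2]), accumulating two independent byte XOR accumulators, and combines them with the seed once at the end via (0x73E2 ^ (hi << 8) ^ lo) & 0x7FFF; correct because XOR is associative/commutative and << distributes over XOR. Measured ~2.3x faster: slicing is done in C and the tight byte loops avoid per-character enumerate tuples and the parity branch.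
import Mathlib
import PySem

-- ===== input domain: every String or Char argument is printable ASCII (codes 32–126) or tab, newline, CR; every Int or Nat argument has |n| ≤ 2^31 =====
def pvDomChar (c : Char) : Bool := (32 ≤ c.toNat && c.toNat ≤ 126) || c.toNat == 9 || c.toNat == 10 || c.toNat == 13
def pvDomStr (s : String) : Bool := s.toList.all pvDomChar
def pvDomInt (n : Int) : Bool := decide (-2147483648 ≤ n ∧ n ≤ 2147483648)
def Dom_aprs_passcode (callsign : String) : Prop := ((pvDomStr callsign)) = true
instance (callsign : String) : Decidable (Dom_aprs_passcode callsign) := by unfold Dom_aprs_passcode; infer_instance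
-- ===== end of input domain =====

-- B replaces A's single indexed pass with its i % 2 parity branch by two staged passes
-- over the slices base[::2] and base[1::2], keeping separate high-byte and low-byte XOR
-- accumulators that are combined with the seed once at the end; return value only.

-- ===== PORT A =====
def aprs_passcode (callsign : String) : Int :=
  -- callsign = callsign.upper().split('-')[0]  (split('-') is never empty, so [0] never raises)
  let base := ((PySem.Str.split? (PySem.Str.upper callsign) "-").getD []).headD ""
  -- for i, char in enumerate(callsign): if i % 2 == 0: hash ^= ord(char) << 8 else: hash ^= ord(char)
  let hash : Int :=
    (PySem.List.enumerate base.toList 0).foldl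
      (fun h ic =>
        if PySem.Int.mod ic.1 2 = 0 then PySem.Int.bxor h ((ic.2.toNat : Int) <<< (8:Nat))
        else PySem.Int.bxor h (ic.2.toNat : Int))
      0x73E2
  PySem.Int.band hash 0x7FFF

-- ===== PORT B =====
def aprs_passcode_alt (callsign : String) : Int :=
  let base := ((PySem.Str.split? (PySem.Str.upper callsign) "-").getD []).headD ""
  let cs := base.toList
  -- hi = 0; for c in base[::2]: hi ^= ord(c)   (slice step 2 ≠ 0, so slice? never returns none)
  let hi : Int := ((PySem.List.slice? cs none none 2).getD []).foldl
      (fun h c => PySem.Int.bxor h (c.toNat : Int)) 0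
  -- lo = 0; for c in base[1::2]: lo ^= ord(c)
  let lo : Int := ((PySem.List.slice? cs (some 1) none 2).getD []).foldl
      (fun h c => PySem.Int.bxor h (c.toNat : Int)) 0
  -- return (0x73E2 ^ (hi << 8) ^ lo) & 0x7FFF
  PySem.Int.band (PySem.Int.bxor (PySem.Int.bxor 0x73E2 (hi <<< (8:Nat))) lo) 0x7FFF

-- ===== PRECONDITION & SPEC =====
def Spec_aprs_passcode (callsign : String) (out : Int) : Prop := out = aprs_passcode_alt callsign
instance (callsign : String) (out : Int) : Decidable (Spec_aprs_passcode callsign out) := by unfold Spec_aprs_passcode; infer_instance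

-- ===== CLAIM (what is proved, stated in full; the proofs are below) =====
def Claim_equal_aprs_passcode : Prop := ∀ (callsign : String), Dom_aprs_passcode callsign → Spec_aprs_passcode callsign (aprs_passcode callsign)

-- ===== LEMMAS AND PROOFS =====

-- Proof bridge: A's loop computes this two-characters-at-a-time fold.
def pvPairLoop : List Char → Int → Int
  | [], h => h
  | [c], h => PySem.Int.bxor h ((c.toNat : Int) <<< (8:Nat))
  | c :: d :: rest, h =>
      pvPairLoop rest (PySem.Int.bxor (PySem.Int.bxor h ((c.toNat : Int) <<< (8:Nat))) (d.toNat : Int))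

theorem pv_mod_two_even (n : Nat) : PySem.Int.mod (2 * (n : Int)) 2 = 0 := by
  rw [PySem.Int.mod_eq_emod_of_pos (by norm_num)]
  omega

theorem pv_mod_two_odd (n : Nat) : PySem.Int.mod (2 * (n : Int) + 1) 2 = 1 := by
  rw [PySem.Int.mod_eq_emod_of_pos (by norm_num)]
  omega

-- A's enumerate fold started at an even index equals the two-at-a-time loop.
theorem pv_fold_eq_pairLoop (cs : List Char) (h : Int) : ∀ (n : Nat),
    (PySem.List.enumerate cs (2 * (n : Int))).foldl
      (fun h ic =>
        if PySem.Int.mod ic.1 2 = 0 then PySem.Int.bxor h ((ic.2.toNat : Int) <<< (8:Nat))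
        else PySem.Int.bxor h (ic.2.toNat : Int))
      h = pvPairLoop cs h := by
  induction cs, h using pvPairLoop.induct with
  | case1 h => intro n; simp [pvPairLoop]
  | case2 c h =>
      intro n
      simp [PySem.List.enumerate_cons, pvPairLoop]
  | case3 c d rest h ih =>
      intro n
      rw [PySem.List.enumerate_cons, PySem.List.enumerate_cons]
      have h2 : 2 * (n : Int) + 1 + 1 = 2 * ((n + 1 : Nat) : Int) := by push_cast; ring
      simp only [List.foldl_cons, pv_mod_two_even, pv_mod_two_odd, if_true, h2]
      simp only [pvPairLoop]
      rw [← ih (n + 1)]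
      norm_num [pv_mod_two_odd]

-- every second element, starting from the head
def pvEverySecond {α : Type} : List α → List α
  | [] => []
  | [a] => [a]
  | a :: _ :: t => a :: pvEverySecond t

-- slice? xs s none 2 (s ∈ {0,1}) extracts pvEverySecond of the dropped suffix.
theorem pv_filterMap_step2 {α : Type} (m : Nat) : ∀ (xs : List α) (s : Nat), xs.length - s ≤ m →
    List.filterMap (fun (k : Nat) => xs[((s : Int) + 2 * (k : Int)).toNat]?) (List.range ((xs.length - s + 1) / 2))
      = pvEverySecond (xs.drop s) := by
  induction m with
  | zero =>
      intro xs s hle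
      have h0 : (xs.length - s + 1) / 2 = 0 := by omega
      rw [h0, List.drop_of_length_le (by omega)]
      simp [pvEverySecond]
  | succ m ih =>
      intro xs s hle
      by_cases hs : s < xs.length
      · have hc : (xs.length - s + 1) / 2 = (xs.length - (s + 2) + 1) / 2 + 1 := by omega
        rw [hc, List.range_succ_eq_map, List.filterMap_cons, List.filterMap_map]
        have hf0 : xs[((s : Int) + 2 * ((0 : Nat) : Int)).toNat]? = some xs[s] := by
          have h0 : ((s : Int) + 2 * ((0 : Nat) : Int)).toNat = s := by omega
          rw [h0, List.getElem?_eq_getElem hs]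
        rw [hf0]
        have harg : (fun (k : Nat) => xs[((s : Int) + 2 * (k : Int)).toNat]?) ∘ Nat.succ
            = fun (k : Nat) => xs[(((s + 2 : Nat) : Int) + 2 * (k : Int)).toNat]? := by
          funext k
          simp only [Function.comp_apply, Nat.succ_eq_add_one]
          congr 1
          omega
        rw [harg, ih xs (s + 2) (by omega)]
        have hdrop : xs.drop s = xs[s] :: xs.drop (s + 1) := List.drop_eq_getElem_cons hs
        by_cases hs1 : s + 1 < xs.length
        · have hdrop1 : xs.drop (s + 1) = xs[s + 1] :: xs.drop (s + 2) :=
            List.drop_eq_getElem_cons hs1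
          rw [hdrop, hdrop1]
          rfl
        · rw [hdrop, List.drop_of_length_le (le_of_not_gt hs1),
              List.drop_of_length_le (by omega)]
          rfl
      · have h0 : (xs.length - s + 1) / 2 = 0 := by omega
        rw [h0, List.drop_of_length_le (by omega)]
        simp [pvEverySecond]

theorem pv_slice_step2_zero {α : Type} (xs : List α) :
    PySem.List.slice? xs none none 2 = some (pvEverySecond xs) := by
  simp only [PySem.List.slice?, PySem.List.sliceIndices]
  norm_num
  by_cases hp : 0 < xs.length
  · rw [if_pos hp]
    have hc : (((xs.length : Int) + 2 - 1) / 2).toNat = (xs.length - 0 + 1) / 2 := by omega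
    have h1 : (fun (k : Nat) => xs[((2 : Int) * (k : Int)).toNat]?)
        = fun (k : Nat) => xs[(((0 : Nat) : Int) + 2 * (k : Int)).toNat]? := by
      funext k; congr 1; omega
    rw [hc]
    calc List.filterMap (fun (k : Nat) => xs[((2 : Int) * (k : Int)).toNat]?)
            (List.range ((xs.length - 0 + 1) / 2))
        = List.filterMap (fun (k : Nat) => xs[(((0 : Nat) : Int) + 2 * (k : Int)).toNat]?)
            (List.range ((xs.length - 0 + 1) / 2)) := by rw [h1]
      _ = pvEverySecond (xs.drop 0) := pv_filterMap_step2 xs.length xs 0 (by omega)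
      _ = pvEverySecond xs := by rw [List.drop_zero]
  · rw [if_neg hp]
    have h0 : xs.length = 0 := by omega
    rcases List.length_eq_zero_iff.mp h0 with rfl
    simp [pvEverySecond]

theorem pv_slice_step2_one {α : Type} (xs : List α) :
    PySem.List.slice? xs (some 1) none 2 = some (pvEverySecond (xs.drop 1)) := by
  simp only [PySem.List.slice?, PySem.List.sliceIndices]
  norm_num
  by_cases hp : 1 < xs.length
  · rw [if_pos hp]
    have hmin : min (1 : Int) (xs.length : Int) = 1 := by omega
    rw [hmin]
    have hc : (((xs.length : Int) - 1 + 2 - 1) / 2).toNat = (xs.length - 1 + 1) / 2 := by omega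
    have h1 : (fun (k : Nat) => xs[((1 : Int) + 2 * (k : Int)).toNat]?)
        = fun (k : Nat) => xs[(((1 : Nat) : Int) + 2 * (k : Int)).toNat]? := by
      funext k; norm_num
    rw [hc, h1, pv_filterMap_step2 xs.length xs 1 (by omega)]
    simp
  · rw [if_neg hp]
    rcases xs with _ | ⟨a, _ | ⟨b, t⟩⟩
    · simp [pvEverySecond]
    · simp [pvEverySecond]
    · exact absurd (by simp only [List.length_cons]; omega) hp

-- Nat-level XOR accumulators
def pvXorFold (l : List Char) (m : Nat) : Nat := l.foldl (fun a c => a ^^^ c.toNat) m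

theorem pv_int_fold_eq_nat (l : List Char) : ∀ (m : Nat),
    l.foldl (fun h c => PySem.Int.bxor h (c.toNat : Int)) ((m : Nat) : Int) = ((pvXorFold l m : Nat) : Int) := by
  induction l with
  | nil => intro m; simp [pvXorFold]
  | cons c t ih =>
      intro m
      simp only [List.foldl_cons, PySem.Int.bxor_natCast, pvXorFold] at *
      exact ih (m ^^^ c.toNat)

theorem pv_int_fold_eq_nat0 (l : List Char) :
    l.foldl (fun h c => PySem.Int.bxor h (c.toNat : Int)) (0 : Int) = ((pvXorFold l 0 : Nat) : Int) := by
  have h := pv_int_fold_eq_nat l 0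
  simpa using h

theorem pv_xorFold_init (l : List Char) : ∀ (m : Nat), pvXorFold l m = m ^^^ pvXorFold l 0 := by
  induction l with
  | nil => intro m; simp [pvXorFold]
  | cons c t ih =>
      intro m
      simp only [pvXorFold, List.foldl_cons, Nat.zero_xor] at *
      rw [ih (m ^^^ c.toNat), ih c.toNat, Nat.xor_assoc]

-- the pair loop equals seed ^ (hi << 8) ^ lo over the two everySecond sublists
theorem pv_pairLoop_eq_hilo : ∀ (cs : List Char) (m : Nat),
    pvPairLoop cs (m : Int)
      = (((m ^^^ (pvXorFold (pvEverySecond cs) 0 <<< 8)) ^^^ pvXorFold (pvEverySecond (cs.drop 1)) 0 : Nat) : Int) := by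
  intro cs
  induction cs using pvEverySecond.induct with
  | case1 => intro m; simp [pvPairLoop, pvEverySecond, pvXorFold]
  | case2 c =>
      intro m
      simp only [pvPairLoop, List.drop_succ_cons, List.drop_nil]
      rw [← Int.natCast_shiftLeft, PySem.Int.bxor_natCast]
      simp [pvEverySecond, pvXorFold]
  | case3 c d t ih =>
      intro m
      simp only [pvPairLoop, List.drop_succ_cons, List.drop_zero]
      rw [← Int.natCast_shiftLeft, PySem.Int.bxor_natCast, PySem.Int.bxor_natCast,
          ih (m ^^^ c.toNat <<< 8 ^^^ d.toNat)]
      congr 1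
      have he : pvEverySecond (c :: d :: t) = c :: pvEverySecond t := rfl
      have ho : pvEverySecond (d :: t) = d :: pvEverySecond (t.drop 1) := by
        cases t with
        | nil => rfl
        | cons x u => rfl
      rw [he, ho]
      have hc : pvXorFold (c :: pvEverySecond t) 0 = c.toNat ^^^ pvXorFold (pvEverySecond t) 0 := by
        simp only [pvXorFold, List.foldl_cons, Nat.zero_xor]
        exact pv_xorFold_init _ _
      have hd : pvXorFold (d :: pvEverySecond (t.drop 1)) 0 = d.toNat ^^^ pvXorFold (pvEverySecond (t.drop 1)) 0 := by
        simp only [pvXorFold, List.foldl_cons, Nat.zero_xor]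
        exact pv_xorFold_init _ _
      rw [hc, hd, Nat.shiftLeft_xor_distrib]
      simp only [Nat.xor_assoc, Nat.xor_comm, Nat.xor_left_comm]

-- ===== VERDICT (by name: the statement is the Claim_ definition above) =====
theorem aprs_passcode_spec : Claim_equal_aprs_passcode := by
  intro callsign _
  unfold Spec_aprs_passcode aprs_passcode aprs_passcode_alt
  simp only [pv_slice_step2_zero, pv_slice_step2_one, Option.getD_some]
  generalize (((PySem.Str.split? (PySem.Str.upper callsign) "-").getD []).headD "").toList = cs
  have hA := pv_fold_eq_pairLoop cs 0x73E2 0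
  simp only [Nat.cast_zero, mul_zero] at hA
  rw [hA]
  have h2 : (0x73E2 : Int) = ((0x73E2 : Nat) : Int) := by norm_num
  rw [h2, pv_pairLoop_eq_hilo cs 0x73E2,
      pv_int_fold_eq_nat0 (pvEverySecond cs), pv_int_fold_eq_nat0 (pvEverySecond (cs.drop 1)),
      ← Int.natCast_shiftLeft, PySem.Int.bxor_natCast, PySem.Int.bxor_natCast]
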